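-- pv_equiv track=rewrite | github.com/jhigh1594/competitive-intelligence-mcp | src/competitive_intelligence/analysis.py | generate_competitor_insights
-- ===== SOURCE A (Python) =====
-- from typing import List, Dict, Any, Optional
--
-- def generate_competitor_insights(activities: List[Dict]) -> List[str]:
--     """Generate key insights from competitor activities."""
--     insights = []
--
--     # Count activity types
--     news_count = sum(1 for activity in activities if activity.get("type") == "news")
--     announcement_count = sum(1 for activity in activities if activity.get("type") == "website_announcement")
--
--     # Count impact levels
--     high_impact_count = sum(1 for activity in activities if activity.get("impact") == "high")
--
--     # Generate insights based on activity patterns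
--     if news_count > 3:
--         insights.append("High news activity detected - possible campaign or significant developments")
--
--     if announcement_count > 2:
--         insights.append("Frequent website updates - active product development or communication")
--
--     if high_impact_count > 1:
--         insights.append("Multiple high-impact activities detected - strategic shifts likely")
--
--     # Add insight if no activities found
--     if not activities:
--         insights.append("No recent activities detected - monitoring may need adjustment")
--
--     return insights
-- ===== SOURCE B (Python) =====
-- def generate_competitor_insights(activities):
--     """Generate key insights from competitor activities.
--
--     Builds one frequency table of (field, value) observations, then applies a
--     declarative rules table to produce the insight strings.
--     """
--     counts = {}
--     for activity in activities:
--         for field in ("type", "impact"):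
--             key = (field, activity.get(field))
--             counts[key] = counts.get(key, 0) + 1
--
--     rules = [
--         (("type", "news"), 3,
--          "High news activity detected - possible campaign or significant developments"),
--         (("type", "website_announcement"), 2,
--          "Frequent website updates - active product development or communication"),
--         (("impact", "high"), 1,
--          "Multiple high-impact activities detected - strategic shifts likely"),
--     ]
--     insights = [msg for key, threshold, msg in rules if counts.get(key, 0) > threshold]
--
--     if not activities:
--         insights.append("No recent activities detected - monitoring may need adjustment")
--     return insights
-- ===== Notes on version B (the rewrite author's own statement) =====
-- stated objective: alternative
-- what changed: Instead of three targeted scans with hard-coded conditions, B builds one generic frequency table keyed by (field, value) observations and produces the insights from a declarative rules table [(key, threshold, message)] via a comprehension.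
import Mathlib
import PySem

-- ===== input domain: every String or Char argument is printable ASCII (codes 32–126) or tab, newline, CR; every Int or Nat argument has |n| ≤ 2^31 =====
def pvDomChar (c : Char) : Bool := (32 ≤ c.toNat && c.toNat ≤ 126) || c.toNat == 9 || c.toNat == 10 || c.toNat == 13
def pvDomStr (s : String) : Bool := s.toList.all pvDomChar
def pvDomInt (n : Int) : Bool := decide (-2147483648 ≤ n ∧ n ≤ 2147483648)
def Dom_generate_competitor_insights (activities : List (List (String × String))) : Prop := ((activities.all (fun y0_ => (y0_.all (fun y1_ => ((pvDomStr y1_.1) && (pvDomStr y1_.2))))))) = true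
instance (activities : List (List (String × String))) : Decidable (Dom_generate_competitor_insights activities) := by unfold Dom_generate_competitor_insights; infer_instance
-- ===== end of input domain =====

-- B replaces A's three targeted scans by a generic (field, value) frequency table and a
-- declarative rules table driving the output; return values proved equal.
-- ===== PORT A =====
def generate_competitor_insights (activities : List (List (String × String))) : List String :=
  let news_count : Int := activities.foldl (fun acc activity => if (PySem.Dict.mk activity).get? "type" == some "news" then acc + 1 else acc) 0
  let announcement_count : Int := activities.foldl (fun acc activity => if (PySem.Dict.mk activity).get? "type" == some "website_announcement" then acc + 1 else acc) 0
  let high_impact_count : Int := activities.foldl (fun acc activity => if (PySem.Dict.mk activity).get? "impact" == some "high" then acc + 1 else acc) 0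
  let insights : List String := []
  let insights := if news_count > 3 then insights ++ ["High news activity detected - possible campaign or significant developments"] else insights
  let insights := if announcement_count > 2 then insights ++ ["Frequent website updates - active product development or communication"] else insights
  let insights := if high_impact_count > 1 then insights ++ ["Multiple high-impact activities detected - strategic shifts likely"] else insights
  let insights := if activities.isEmpty then insights ++ ["No recent activities detected - monitoring may need adjustment"] else insights
  insights

-- ===== PORT B =====
-- the frequency table: counts[(field, activity.get(field))] += 1, via counts.get(key,0)+1
def pvCounts (activities : List (List (String × String))) : PySem.Dict (String × Option String) Int :=
  activities.foldl
    (fun counts activity =>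
      ["type", "impact"].foldl
        (fun counts field =>
          let key := (field, (PySem.Dict.mk activity).get? field)
          counts.insert key (counts.getD key 0 + 1))
        counts)
    PySem.Dict.empty

def pvRules : List ((String × Option String) × Int × String) :=
  [(("type", some "news"), 3, "High news activity detected - possible campaign or significant developments"),
   (("type", some "website_announcement"), 2, "Frequent website updates - active product development or communication"),
   (("impact", some "high"), 1, "Multiple high-impact activities detected - strategic shifts likely")]

def generate_competitor_insights_alt (activities : List (List (String × String))) : List String :=
  let counts := pvCounts activities
  let insights := pvRules.filterMap (fun r => if counts.getD r.1 0 > r.2.1 then some r.2.2 else none)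
  if activities.isEmpty then insights ++ ["No recent activities detected - monitoring may need adjustment"] else insights

-- ===== PRECONDITION & SPEC =====
def Spec_generate_competitor_insights (activities : List (List (String × String))) (out : List String) : Prop := out = generate_competitor_insights_alt activities
instance (activities : List (List (String × String))) (out : List String) : Decidable (Spec_generate_competitor_insights activities out) := by unfold Spec_generate_competitor_insights; infer_instance

-- ===== CLAIM (what is proved, stated in full; the proofs are below) =====
def Claim_equal_generate_competitor_insights : Prop := ∀ (activities : List (List (String × String))), Dom_generate_competitor_insights activities → Spec_generate_competitor_insights activities (generate_competitor_insights activities)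

-- ===== LEMMAS AND PROOFS =====
-- the (field, value) observations an activity list contributes to the table
def pvObs (activities : List (List (String × String))) : List (String × Option String) :=
  activities.flatMap (fun a => [("type", (PySem.Dict.mk a).get? "type"), ("impact", (PySem.Dict.mk a).get? "impact")])

theorem pvCounts_eq_foldl_obs (activities : List (List (String × String))) :
    pvCounts activities =
      (pvObs activities).foldl (fun d x => d.insert x (d.getD x 0 + 1)) PySem.Dict.empty := by
  unfold pvCounts pvObs
  rw [List.foldl_flatMap]
  rfl

theorem pvCounts_getD (activities : List (List (String × String))) (k : String × Option String) :
    (pvCounts activities).getD k 0 = ((pvObs activities).count k : Int) := by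
  rw [pvCounts_eq_foldl_obs, PySem.Dict.getD_foldl_insert_add_one, PySem.Dict.getD_empty]
  ring

theorem pvObs_count_type (activities : List (List (String × String))) (v : String) :
    ((pvObs activities).count ("type", some v) : Int) =
      activities.foldl (fun acc a => if (PySem.Dict.mk a).get? "type" == some v then acc + 1 else acc) 0 := by
  rw [PySem.List.foldl_count_if]
  induction activities with
  | nil => simp [pvObs]
  | cons a t ih =>
    simp only [pvObs, List.flatMap_cons, List.count_append] at ih ⊢
    by_cases h : (PySem.Dict.mk a).get? "type" == some v <;> simp_all <;> try omega

theorem pvObs_count_impact (activities : List (List (String × String))) (v : String) :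
    ((pvObs activities).count ("impact", some v) : Int) =
      activities.foldl (fun acc a => if (PySem.Dict.mk a).get? "impact" == some v then acc + 1 else acc) 0 := by
  rw [PySem.List.foldl_count_if]
  induction activities with
  | nil => simp [pvObs]
  | cons a t ih =>
    simp only [pvObs, List.flatMap_cons, List.count_append] at ih ⊢
    by_cases h : (PySem.Dict.mk a).get? "impact" == some v <;> simp_all <;> try omega

-- ===== VERDICT (by name: the statement is the Claim_ definition above) =====
theorem generate_competitor_insights_spec : Claim_equal_generate_competitor_insights := by
  intro activities _
  unfold Spec_generate_competitor_insights generate_competitor_insights generate_competitor_insights_alt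
  simp only [pvRules, List.filterMap_cons, List.filterMap_nil, pvCounts_getD,
    pvObs_count_type, pvObs_count_impact]
  split_ifs <;> simp_all
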